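-- pv_equiv track=rewrite | github.com/teabe-dev/teabe | common/base.py | calculate_debts
-- ===== SOURCE A (Python) =====
-- def calculate_debts(amounts:dict) -> list:
--     # 計算 誰要給誰多少錢 演算法
--     # {1: -92912819, 3: 148785942, 7: -4476621, 8: 23067896, 9: -74464398}
--     # ︾ ︾ ︾ ︾
--     # [(1, 3, 92912819), (7, 3, 4476621), (9, 3, 51396502), (9, 8, 23067896)]
--     lenders = {person: amount for person, amount in amounts.items() if amount > 0}
--     borrowers = {person: -amount for person, amount in amounts.items() if amount < 0}
--     transactions = []
--     for lender_key in list(lenders.keys()):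
--         for borrower_key in list(borrowers.keys()):
--             if lenders[lender_key] > borrowers[borrower_key]:
--                 transactions.append((borrower_key, lender_key, borrowers[borrower_key]))
--                 lenders[lender_key] -= borrowers[borrower_key]
--                 del borrowers[borrower_key]
--             else:
--                 transactions.append((borrower_key, lender_key, lenders[lender_key]))
--                 borrowers[borrower_key] -= lenders[lender_key]
--                 del lenders[lender_key]
--                 break
--     return transactions
-- ===== SOURCE B (Python) =====
-- def calculate_debts(amounts: dict) -> list:
--     # Single flat two-pointer walk over lenders and borrowers instead of nested dict loops.
--     lenders = [(p, a) for p, a in amounts.items() if a > 0]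
--     borrowers = [(p, -a) for p, a in amounts.items() if a < 0]
--     transactions = []
--     i = j = 0
--     lrem = lenders[0][1] if lenders else 0
--     brem = borrowers[0][1] if borrowers else 0
--     while i < len(lenders) and j < len(borrowers):
--         lk = lenders[i][0]
--         bk = borrowers[j][0]
--         if lrem > brem:
--             transactions.append((bk, lk, brem))
--             lrem -= brem
--             j += 1
--             if j < len(borrowers):
--                 brem = borrowers[j][1]
--         else:
--             transactions.append((bk, lk, lrem))
--             brem -= lrem
--             i += 1
--             if i < len(lenders):
--                 lrem = lenders[i][1]
--     return transactions
-- ===== Notes on version B (the rewrite author's own statement) =====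
-- stated objective: simpler
-- what changed: Replaced the nested dict loops with per-lender key snapshots, in-place deletion and break by a single flat two-pointer walk over the ordered lender and borrower lists with running remainders.
import Mathlib
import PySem

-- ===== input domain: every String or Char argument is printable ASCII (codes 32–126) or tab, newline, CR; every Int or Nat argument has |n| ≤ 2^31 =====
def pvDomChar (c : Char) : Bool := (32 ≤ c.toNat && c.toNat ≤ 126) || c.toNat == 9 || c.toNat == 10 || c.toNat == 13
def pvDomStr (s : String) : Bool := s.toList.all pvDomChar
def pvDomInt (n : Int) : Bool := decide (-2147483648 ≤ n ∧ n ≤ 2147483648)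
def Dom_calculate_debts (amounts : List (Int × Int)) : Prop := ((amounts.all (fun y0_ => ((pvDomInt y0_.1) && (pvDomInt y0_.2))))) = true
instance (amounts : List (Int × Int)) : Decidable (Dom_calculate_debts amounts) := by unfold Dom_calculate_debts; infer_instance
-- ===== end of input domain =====

-- B replaces A's nested dict loops (snapshot keys / del / break) by one flat two-pointer
-- walk over the ordered lender and borrower lists with running remainders (objective: simpler).

-- ===== PORT A =====
-- inner 'for borrower_key in list(borrowers.keys())' loop: snapshot key list, dict state
def pvInnerA (lk : Int) : List Int → PySem.Dict Int Int → PySem.Dict Int Int →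
    List (Int × Int × Int) → PySem.Dict Int Int × PySem.Dict Int Int × List (Int × Int × Int)
  | [], L, B, tr => (L, B, tr)
  | bk :: rest, L, B, tr =>
    let lv := (L.get? lk).getD 0   -- lenders[lender_key]; lk is present here, so no KeyError
    let bv := (B.get? bk).getD 0   -- borrowers[borrower_key]; bk is present here
    if lv > bv then
      pvInnerA lk rest (L.insert lk (lv - bv)) (B.erase bk) (tr ++ [(bk, lk, bv)])
    else
      (L.erase lk, B.insert bk (bv - lv), tr ++ [(bk, lk, lv)])   -- break

-- outer 'for lender_key in list(lenders.keys())' loop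
def pvOuterA : List Int → PySem.Dict Int Int → PySem.Dict Int Int →
    List (Int × Int × Int) → List (Int × Int × Int)
  | [], _, _, tr => tr
  | lk :: lks, L, B, tr =>
    match pvInnerA lk B.keys L B tr with
    | (L', B', tr') => pvOuterA lks L' B' tr'

def calculate_debts (amounts : List (Int × Int)) : List (Int × Int × Int) :=
  -- dict comprehensions over amounts.items(); amounts is the dict's item list in order
  let lenders : PySem.Dict Int Int := PySem.Dict.mk (amounts.filter (fun p => decide (p.2 > 0)))
  let borrowers : PySem.Dict Int Int :=
    PySem.Dict.mk ((amounts.filter (fun p => decide (p.2 < 0))).map (fun p => (p.1, -p.2)))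
  pvOuterA lenders.keys lenders borrowers []

-- ===== PORT B =====
-- the single while loop of Source B: cursors (current key, remaining, rest) on both sides
def pvLoopB (lk lrem : Int) (ls : List (Int × Int)) (bk brem : Int) (bs : List (Int × Int)) :
    List (Int × Int × Int) :=
  if lrem > brem then
    (bk, lk, brem) ::
      (match bs with
       | [] => []
       | (bk', bv') :: bs' => pvLoopB lk (lrem - brem) ls bk' bv' bs')
  else
    (bk, lk, lrem) ::
      (match ls with
       | [] => []
       | (lk', lv') :: ls' => pvLoopB lk' lv' ls' bk (brem - lrem) bs)
termination_by ls.length + bs.length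
decreasing_by all_goals simp [List.length_cons]

def calculate_debts_alt (amounts : List (Int × Int)) : List (Int × Int × Int) :=
  let lenders := amounts.filter (fun p => decide (p.2 > 0))
  let borrowers := (amounts.filter (fun p => decide (p.2 < 0))).map (fun p => (p.1, -p.2))
  match lenders, borrowers with
  | (lk, lv) :: ls, (bk, bv) :: bs => pvLoopB lk lv ls bk bv bs
  | _, _ => []

-- ===== PRECONDITION & SPEC =====
-- The parameter is a Python dict, so its keys are distinct; Pre_ states exactly that
-- (no actual dict input is excluded — a key list with duplicates represents no dict).
def Pre_calculate_debts (amounts : List (Int × Int)) : Prop := (amounts.map Prod.fst).Nodup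
instance (amounts : List (Int × Int)) : Decidable (Pre_calculate_debts amounts) := by
  unfold Pre_calculate_debts; infer_instance

def pvWitness_calculate_debts : (List (Int × Int)) := [(1, -2), (3, 2), (7, 5), (9, -5)]

def Spec_calculate_debts (amounts : List (Int × Int)) (out : List (Int × Int × Int)) : Prop :=
  out = calculate_debts_alt amounts
instance (amounts : List (Int × Int)) (out : List (Int × Int × Int)) :
    Decidable (Spec_calculate_debts amounts out) := by unfold Spec_calculate_debts; infer_instance

-- ===== CLAIM (what is proved, stated in full; the proofs are below) =====
def Claim_equal_calculate_debts : Prop := ∀ (amounts : List (Int × Int)),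
  Dom_calculate_debts amounts → Pre_calculate_debts amounts →
  Spec_calculate_debts amounts (calculate_debts amounts)

-- ===== LEMMAS AND PROOFS =====

-- head operations of A's dicts under distinct keys
theorem pv_get_head (k v : Int) (rest : List (Int × Int)) :
    (PySem.Dict.mk ((k, v) :: rest)).get? k = some v := by
  simp [PySem.Dict.get?_mk_cons]

theorem pv_erase_head (k v : Int) (rest : List (Int × Int)) (h : k ∉ rest.map Prod.fst) :
    (PySem.Dict.mk ((k, v) :: rest)).erase k = PySem.Dict.mk rest := by
  simp [PySem.Dict.erase]
  intro a b hab hak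
  exact h (by simpa [hak] using List.mem_map_of_mem (f := Prod.fst) hab)

theorem pv_insert_head (k v w : Int) (rest : List (Int × Int)) (h : k ∉ rest.map Prod.fst) :
    (PySem.Dict.mk ((k, v) :: rest)).insert k w = PySem.Dict.mk ((k, w) :: rest) := by
  simp [PySem.Dict.insert]
  have hall : ∀ p ∈ rest, (if p.1 = k then (k, w) else p) = id p := by
    intro p hp
    have : p.1 ≠ k := fun e => h (e ▸ List.mem_map_of_mem (f := Prod.fst) hp)
    simp [this]
  rw [List.map_congr_left hall, List.map_id]

-- once the borrowers dict is empty every remaining outer iteration is a no-op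
theorem pv_outer_emptyB : ∀ (lks : List Int) (L : PySem.Dict Int Int) (tr : List (Int × Int × Int)),
    pvOuterA lks L (PySem.Dict.mk []) tr = tr := by
  intro lks
  induction lks with
  | nil => intro L tr; rfl
  | cons lk lks ih =>
    intro L tr
    show pvOuterA (lk :: lks) L (PySem.Dict.mk []) tr = tr
    simp only [pvOuterA, PySem.Dict.keys_mk, List.map_nil, pvInnerA]
    exact ih L tr

-- main invariant: A's remaining computation from a mid-state equals B's loop
theorem pv_main : ∀ (n : Nat) (ls bs : List (Int × Int)) (lk lv bk bv : Int)
    (tr : List (Int × Int × Int)),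
    ls.length + bs.length ≤ n →
    (lk :: ls.map Prod.fst).Nodup → (bk :: bs.map Prod.fst).Nodup →
    pvOuterA (lk :: ls.map Prod.fst) (PySem.Dict.mk ((lk, lv) :: ls))
        (PySem.Dict.mk ((bk, bv) :: bs)) tr
      = tr ++ pvLoopB lk lv ls bk bv bs := by
  intro n
  induction n using Nat.strong_induction_on with
  | _ n ih =>
    intro ls bs lk lv bk bv tr hlen hL hB
    have hLk : lk ∉ ls.map Prod.fst := (List.nodup_cons.mp hL).1
    have hBk : bk ∉ bs.map Prod.fst := (List.nodup_cons.mp hB).1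
    simp only [pvOuterA, PySem.Dict.keys_mk, List.map_cons, pvInnerA,
      pv_get_head, Option.getD_some]
    rw [pvLoopB.eq_def]
    by_cases hc : lv > bv
    · simp only [if_pos hc, pv_erase_head bk bv bs hBk,
        pv_insert_head lk lv (lv - bv) ls hLk]
      cases bs with
      | nil =>
        simp only [List.map_nil, pvInnerA, pv_outer_emptyB]
      | cons b bs' =>
        obtain ⟨bk', bv'⟩ := b
        have hB' : (bk' :: bs'.map Prod.fst).Nodup := (List.nodup_cons.mp hB).2
        have hL' : (lk :: ls.map Prod.fst).Nodup := hL
        have hlen' : ls.length + bs'.length ≤ n - 1 := by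
          simp [List.length_cons] at hlen; omega
        have hn : n - 1 < n := by
          simp [List.length_cons] at hlen; omega
        have := ih (n - 1) hn ls bs' lk (lv - bv) bk' bv' (tr ++ [(bk, lk, bv)]) hlen' hL' hB'
        simp only [pvOuterA, PySem.Dict.keys_mk, List.map_cons] at this
        simp only [List.map_cons]
        rw [this]
        simp
    · simp only [if_neg hc, pv_erase_head lk lv ls hLk, pv_insert_head bk bv (bv - lv) bs hBk]
      cases ls with
      | nil =>
        simp [pvOuterA]
      | cons l ls' =>
        obtain ⟨lk', lv'⟩ := l
        have hL' : (lk' :: ls'.map Prod.fst).Nodup := (List.nodup_cons.mp hL).2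
        have hB' : (bk :: bs.map Prod.fst).Nodup := by
          simpa using hB
        have hlen' : ls'.length + bs.length ≤ n - 1 := by
          simp [List.length_cons] at hlen; omega
        have hn : n - 1 < n := by
          simp [List.length_cons] at hlen; omega
        have := ih (n - 1) hn ls' bs lk' lv' bk (bv - lv) (tr ++ [(bk, lk, lv)]) hlen' hL' hB'
        simp only [List.map_cons]
        rw [this]
        simp

-- ===== VERDICT (by name: the statement is the Claim_ definition above) =====
theorem calculate_debts_spec : Claim_equal_calculate_debts := by
  intro amounts _ hpre
  unfold Spec_calculate_debts calculate_debts calculate_debts_alt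
  have hsubL : ((amounts.filter (fun p => decide (p.2 > 0))).map Prod.fst).Nodup :=
    ((List.filter_sublist (l := amounts)).map Prod.fst).nodup hpre
  have hsubB : (((amounts.filter (fun p => decide (p.2 < 0))).map
      (fun p => (p.1, -p.2))).map Prod.fst).Nodup := by
    have : ((amounts.filter (fun p => decide (p.2 < 0))).map
        (fun p : Int × Int => (p.1, -p.2))).map Prod.fst
        = (amounts.filter (fun p => decide (p.2 < 0))).map Prod.fst := by
      simp [List.map_map, Function.comp]
    rw [this]
    exact ((List.filter_sublist (l := amounts)).map Prod.fst).nodup hpre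
  cases hld : amounts.filter (fun p => decide (p.2 > 0)) with
  | nil => simp [pvOuterA]
  | cons l ls =>
    obtain ⟨lk, lv⟩ := l
    cases hbd : (amounts.filter (fun p => decide (p.2 < 0))).map (fun p => (p.1, -p.2)) with
    | nil => simp [pv_outer_emptyB]
    | cons b bs =>
      obtain ⟨bk, bv⟩ := b
      rw [hld] at hsubL
      rw [hbd] at hsubB
      simp only [PySem.Dict.keys_mk, List.map_cons]
      exact (pv_main (ls.length + bs.length) ls bs lk lv bk bv []
        le_rfl (by simpa using hsubL) (by simpa using hsubB)).trans (by simp)
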